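-- pv_equiv track=rewrite | github.com/kmaag/Temporal-Uncertainty-Estimates | helper.py | name_to_latex
-- ===== SOURCE A (Python) =====
-- def name_to_latex( name ):
--   """
--   metric names in latex
--   """
--
--   for i in range(100):
--     if name == "cprob"+str(i):
--       return "$C_{"+str(i)+"}$"
--
--   mapping = {'E': '$\\bar E$',
--              'E_bd': '${\\bar E}_{bd}$',
--              'E_in': '${\\bar E}_{in}$',
--              'E_rel_in': '$\\tilde{\\bar E}_{in}$',
--              'E_rel': '$\\tilde{\\bar E}$',
--              'M': '$\\bar M$',
--              'M_bd': '${\\bar M}_{bd}$',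
--              'M_in': '${\\bar M}_{in}$',
--              'M_rel_in': '$\\tilde{\\bar M}_{in}$',
--              'M_rel': '$\\tilde{\\bar M}$',
--              'S': '$S$',
--              'S_bd': '${S}_{bd}$',
--              'S_in': '${S}_{in}$',
--              'S_rel_in': '$\\tilde{S}_{in}$',
--              'S_rel': '$\\tilde{S}$',
--              'V': '$\\bar V$',
--              'V_bd': '${\\bar V}_{bd}$',
--              'V_in': '${\\bar V}_{in}$',
--              'V_rel_in': '$\\tilde{\\bar V}_{in}$',
--              'V_rel': '$\\tilde{\\bar V}$',
--              'mean_x' : '${\\bar k}_{v}$',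
--              'mean_y' : '${\\bar k}_{h}$',
--              'C_p' : '${C}_{p}$',
--              'iou' : '$IoU$',
--              'score' : '$s$',
--              'survival' : '$v$',
--              'ratio' : '$r$',
--              'deformation' : '$f$',
--              'diff_mean' : '$d_{c}$',
--              'diff_size' : '$d_{s}$'}
--   if str(name) in mapping:
--     return mapping[str(name)]
--   else:
--     return str(name)
-- ===== SOURCE B (Python) =====
-- def name_to_latex( name ):
--   """
--   metric names in latex: direct parse of 'cprob<i>' instead of the
--   generate-and-compare loop, and an explicit branch table for the rest
--   """
--   if isinstance(name, str) and name.startswith("cprob"):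
--     suf = name[5:]
--     # exactly the strings str(0)..str(99): 1-2 digits, no leading zero
--     if suf.isdigit() and (len(suf) == 1 or (len(suf) == 2 and suf[0] != "0")):
--       return "$C_{" + suf + "}$"
--   name = str(name)
--   if name == 'E': return '$\\bar E$'
--   elif name == 'E_bd': return '${\\bar E}_{bd}$'
--   elif name == 'E_in': return '${\\bar E}_{in}$'
--   elif name == 'E_rel_in': return '$\\tilde{\\bar E}_{in}$'
--   elif name == 'E_rel': return '$\\tilde{\\bar E}$'
--   elif name == 'M': return '$\\bar M$'
--   elif name == 'M_bd': return '${\\bar M}_{bd}$'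
--   elif name == 'M_in': return '${\\bar M}_{in}$'
--   elif name == 'M_rel_in': return '$\\tilde{\\bar M}_{in}$'
--   elif name == 'M_rel': return '$\\tilde{\\bar M}$'
--   elif name == 'S': return '$S$'
--   elif name == 'S_bd': return '${S}_{bd}$'
--   elif name == 'S_in': return '${S}_{in}$'
--   elif name == 'S_rel_in': return '$\\tilde{S}_{in}$'
--   elif name == 'S_rel': return '$\\tilde{S}$'
--   elif name == 'V': return '$\\bar V$'
--   elif name == 'V_bd': return '${\\bar V}_{bd}$'
--   elif name == 'V_in': return '${\\bar V}_{in}$'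
--   elif name == 'V_rel_in': return '$\\tilde{\\bar V}_{in}$'
--   elif name == 'V_rel': return '$\\tilde{\\bar V}$'
--   elif name == 'mean_x': return '${\\bar k}_{v}$'
--   elif name == 'mean_y': return '${\\bar k}_{h}$'
--   elif name == 'C_p': return '${C}_{p}$'
--   elif name == 'iou': return '$IoU$'
--   elif name == 'score': return '$s$'
--   elif name == 'survival': return '$v$'
--   elif name == 'ratio': return '$r$'
--   elif name == 'deformation': return '$f$'
--   elif name == 'diff_mean': return '$d_{c}$'
--   elif name == 'diff_size': return '$d_{s}$'
--   else: return name
-- ===== Notes on version B (the rewrite author's own statement) =====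
-- stated objective: alternative
-- what changed: B parses the suffix after the cprob prefix directly (all digits, length 1 or 2, no leading zero) instead of generating and comparing all 100 candidate strings, and replaces the dict lookup by an explicit branch table.
import Mathlib
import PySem

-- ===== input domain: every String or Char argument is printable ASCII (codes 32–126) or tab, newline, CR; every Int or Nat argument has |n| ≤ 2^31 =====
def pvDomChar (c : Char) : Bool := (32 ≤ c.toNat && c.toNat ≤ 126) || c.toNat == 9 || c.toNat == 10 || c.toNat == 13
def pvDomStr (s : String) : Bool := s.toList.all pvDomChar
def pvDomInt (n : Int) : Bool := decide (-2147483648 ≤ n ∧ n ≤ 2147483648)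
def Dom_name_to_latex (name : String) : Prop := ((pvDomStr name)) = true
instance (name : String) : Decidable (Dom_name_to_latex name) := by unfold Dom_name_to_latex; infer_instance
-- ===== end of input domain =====

-- B parses the index suffix directly instead of generating and comparing 100 candidate strings,
-- and uses an explicit branch table instead of the dict (objective: alternative).


-- ===== PORT A =====
-- the dict literal of A, as an insertion-order association list
def aMapping : PySem.Dict String String := PySem.Dict.ofList
  [("E", "$\\bar E$"), ("E_bd", "${\\bar E}_{bd}$"), ("E_in", "${\\bar E}_{in}$"),
   ("E_rel_in", "$\\tilde{\\bar E}_{in}$"), ("E_rel", "$\\tilde{\\bar E}$"),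
   ("M", "$\\bar M$"), ("M_bd", "${\\bar M}_{bd}$"), ("M_in", "${\\bar M}_{in}$"),
   ("M_rel_in", "$\\tilde{\\bar M}_{in}$"), ("M_rel", "$\\tilde{\\bar M}$"),
   ("S", "$S$"), ("S_bd", "${S}_{bd}$"), ("S_in", "${S}_{in}$"),
   ("S_rel_in", "$\\tilde{S}_{in}$"), ("S_rel", "$\\tilde{S}$"),
   ("V", "$\\bar V$"), ("V_bd", "${\\bar V}_{bd}$"), ("V_in", "${\\bar V}_{in}$"),
   ("V_rel_in", "$\\tilde{\\bar V}_{in}$"), ("V_rel", "$\\tilde{\\bar V}$"),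
   ("mean_x", "${\\bar k}_{v}$"), ("mean_y", "${\\bar k}_{h}$"),
   ("C_p", "${C}_{p}$"), ("iou", "$IoU$"), ("score", "$s$"), ("survival", "$v$"),
   ("ratio", "$r$"), ("deformation", "$f$"), ("diff_mean", "$d_{c}$"),
   ("diff_size", "$d_{s}$")]

-- 'for i in range(100): if name == "cprob"+str(i): return …' : first hit of the scan
def name_to_latex (name : String) : String :=
  match (PySem.List.pyRange 0 100 1).find?
      (fun i => name.toList == "cprob".toList ++ PySem.Int.toChars i) with
  | some i => String.ofList ("$C_{".toList ++ PySem.Int.toChars i ++ "}$".toList)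
  | none =>
    if aMapping.contains name then aMapping.getD name name else name

-- ===== PORT B =====
-- the explicit branch table of Source B (if/elif chain)
def bTable (name : String) : String :=
  if name = "E" then "$\\bar E$"
  else if name = "E_bd" then "${\\bar E}_{bd}$"
  else if name = "E_in" then "${\\bar E}_{in}$"
  else if name = "E_rel_in" then "$\\tilde{\\bar E}_{in}$"
  else if name = "E_rel" then "$\\tilde{\\bar E}$"
  else if name = "M" then "$\\bar M$"
  else if name = "M_bd" then "${\\bar M}_{bd}$"
  else if name = "M_in" then "${\\bar M}_{in}$"
  else if name = "M_rel_in" then "$\\tilde{\\bar M}_{in}$"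
  else if name = "M_rel" then "$\\tilde{\\bar M}$"
  else if name = "S" then "$S$"
  else if name = "S_bd" then "${S}_{bd}$"
  else if name = "S_in" then "${S}_{in}$"
  else if name = "S_rel_in" then "$\\tilde{S}_{in}$"
  else if name = "S_rel" then "$\\tilde{S}$"
  else if name = "V" then "$\\bar V$"
  else if name = "V_bd" then "${\\bar V}_{bd}$"
  else if name = "V_in" then "${\\bar V}_{in}$"
  else if name = "V_rel_in" then "$\\tilde{\\bar V}_{in}$"
  else if name = "V_rel" then "$\\tilde{\\bar V}$"
  else if name = "mean_x" then "${\\bar k}_{v}$"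
  else if name = "mean_y" then "${\\bar k}_{h}$"
  else if name = "C_p" then "${C}_{p}$"
  else if name = "iou" then "$IoU$"
  else if name = "score" then "$s$"
  else if name = "survival" then "$v$"
  else if name = "ratio" then "$r$"
  else if name = "deformation" then "$f$"
  else if name = "diff_mean" then "$d_{c}$"
  else if name = "diff_size" then "$d_{s}$"
  else name

-- suf.isdigit() and (len(suf) == 1 or (len(suf) == 2 and suf[0] != "0"))
def bSufOk (suf : List Char) : Bool :=
  PySem.Chars.strIsdigit suf &&
    (suf.length == 1 || (suf.length == 2 && !(PySem.List.pyGet? suf 0 == some '0')))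

def name_to_latex_alt (name : String) : String :=
  if PySem.Chars.startswith name.toList "cprob".toList then
    let suf := PySem.List.slice name.toList (some 5) none
    if bSufOk suf then String.ofList ("$C_{".toList ++ suf ++ "}$".toList)
    else bTable name
  else bTable name

-- ===== PRECONDITION & SPEC =====
def Spec_name_to_latex (name : String) (out : String) : Prop := out = name_to_latex_alt name
instance (name : String) (out : String) : Decidable (Spec_name_to_latex name out) := by unfold Spec_name_to_latex; infer_instance

-- ===== CLAIM (what is proved, stated in full; the proofs are below) =====
def Claim_equal_name_to_latex : Prop := ∀ (name : String), Dom_name_to_latex name → Spec_name_to_latex name (name_to_latex name)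

-- ===== LEMMAS AND PROOFS =====

-- on every generated candidate 'cprob' + str(i), the two ports agree (finite check)
set_option maxRecDepth 100000 in
theorem ports_agree_on_candidates : ∀ i ∈ PySem.List.pyRange 0 100 1,
    name_to_latex (String.ofList ("cprob".toList ++ PySem.Int.toChars i)) =
    name_to_latex_alt (String.ofList ("cprob".toList ++ PySem.Int.toChars i)) := by
  decide

-- every generated suffix str(0)..str(99) passes B's parse (finite check)
theorem sufOk_toChars : ∀ i ∈ PySem.List.pyRange 0 100 1,
    bSufOk (PySem.Int.toChars i) = true := by
  decide

-- a decimal digit is one of the ten digit characters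
theorem digit_cases (c : Char) (h : PySem.Chars.isdigit c = true) :
    c ∈ ['0', '1', '2', '3', '4', '5', '6', '7', '8', '9'] := by
  simp only [PySem.Chars.isdigit, Bool.and_eq_true, decide_eq_true_eq] at h
  have h1 : 48 ≤ c.toNat := h.1
  have h2 : c.toNat ≤ 57 := h.2
  have hc : Char.ofNat c.toNat = c := Char.ofNat_toNat c
  interval_cases h3 : c.toNat <;> rw [← hc] <;> decide

-- B's parse is complete: any suffix it accepts is str(i) for some i in range(100)
theorem sufOk_complete (suf : List Char) (h : bSufOk suf = true) :
    ∃ i ∈ PySem.List.pyRange 0 100 1, PySem.Int.toChars i = suf := by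
  rcases suf with _ | ⟨d, _ | ⟨e, _ | ⟨f, t⟩⟩⟩
  · exact absurd h (by decide)
  · have hd : PySem.Chars.isdigit d = true := by
      simp [bSufOk, PySem.Chars.strIsdigit] at h
      exact h
    have hd' := digit_cases d hd
    fin_cases hd'
    · exact ⟨0, (PySem.List.mem_pyRange_one).mpr (by omega), by decide⟩
    · exact ⟨1, (PySem.List.mem_pyRange_one).mpr (by omega), by decide⟩
    · exact ⟨2, (PySem.List.mem_pyRange_one).mpr (by omega), by decide⟩
    · exact ⟨3, (PySem.List.mem_pyRange_one).mpr (by omega), by decide⟩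
    · exact ⟨4, (PySem.List.mem_pyRange_one).mpr (by omega), by decide⟩
    · exact ⟨5, (PySem.List.mem_pyRange_one).mpr (by omega), by decide⟩
    · exact ⟨6, (PySem.List.mem_pyRange_one).mpr (by omega), by decide⟩
    · exact ⟨7, (PySem.List.mem_pyRange_one).mpr (by omega), by decide⟩
    · exact ⟨8, (PySem.List.mem_pyRange_one).mpr (by omega), by decide⟩
    · exact ⟨9, (PySem.List.mem_pyRange_one).mpr (by omega), by decide⟩
  · have hh : (PySem.Chars.isdigit d = true ∧ PySem.Chars.isdigit e = true) ∧ d ≠ '0' := by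
      simp [bSufOk, PySem.Chars.strIsdigit, PySem.List.pyGet?, PySem.List.pyIdx?] at h
      tauto
    have hd' : d ∈ ['1','2','3','4','5','6','7','8','9'] := by
      have hmem := digit_cases d hh.1.1
      simp only [List.mem_cons, List.not_mem_nil, or_false] at hmem ⊢
      rcases hmem with h0 | rest
      · exact absurd h0 hh.2
      · exact rest
    have he' := digit_cases e hh.1.2
    fin_cases hd' <;> fin_cases he'
    · exact ⟨10, (PySem.List.mem_pyRange_one).mpr (by omega), by decide⟩
    · exact ⟨11, (PySem.List.mem_pyRange_one).mpr (by omega), by decide⟩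
    · exact ⟨12, (PySem.List.mem_pyRange_one).mpr (by omega), by decide⟩
    · exact ⟨13, (PySem.List.mem_pyRange_one).mpr (by omega), by decide⟩
    · exact ⟨14, (PySem.List.mem_pyRange_one).mpr (by omega), by decide⟩
    · exact ⟨15, (PySem.List.mem_pyRange_one).mpr (by omega), by decide⟩
    · exact ⟨16, (PySem.List.mem_pyRange_one).mpr (by omega), by decide⟩
    · exact ⟨17, (PySem.List.mem_pyRange_one).mpr (by omega), by decide⟩
    · exact ⟨18, (PySem.List.mem_pyRange_one).mpr (by omega), by decide⟩
    · exact ⟨19, (PySem.List.mem_pyRange_one).mpr (by omega), by decide⟩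
    · exact ⟨20, (PySem.List.mem_pyRange_one).mpr (by omega), by decide⟩
    · exact ⟨21, (PySem.List.mem_pyRange_one).mpr (by omega), by decide⟩
    · exact ⟨22, (PySem.List.mem_pyRange_one).mpr (by omega), by decide⟩
    · exact ⟨23, (PySem.List.mem_pyRange_one).mpr (by omega), by decide⟩
    · exact ⟨24, (PySem.List.mem_pyRange_one).mpr (by omega), by decide⟩
    · exact ⟨25, (PySem.List.mem_pyRange_one).mpr (by omega), by decide⟩
    · exact ⟨26, (PySem.List.mem_pyRange_one).mpr (by omega), by decide⟩
    · exact ⟨27, (PySem.List.mem_pyRange_one).mpr (by omega), by decide⟩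
    · exact ⟨28, (PySem.List.mem_pyRange_one).mpr (by omega), by decide⟩
    · exact ⟨29, (PySem.List.mem_pyRange_one).mpr (by omega), by decide⟩
    · exact ⟨30, (PySem.List.mem_pyRange_one).mpr (by omega), by decide⟩
    · exact ⟨31, (PySem.List.mem_pyRange_one).mpr (by omega), by decide⟩
    · exact ⟨32, (PySem.List.mem_pyRange_one).mpr (by omega), by decide⟩
    · exact ⟨33, (PySem.List.mem_pyRange_one).mpr (by omega), by decide⟩
    · exact ⟨34, (PySem.List.mem_pyRange_one).mpr (by omega), by decide⟩
    · exact ⟨35, (PySem.List.mem_pyRange_one).mpr (by omega), by decide⟩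
    · exact ⟨36, (PySem.List.mem_pyRange_one).mpr (by omega), by decide⟩
    · exact ⟨37, (PySem.List.mem_pyRange_one).mpr (by omega), by decide⟩
    · exact ⟨38, (PySem.List.mem_pyRange_one).mpr (by omega), by decide⟩
    · exact ⟨39, (PySem.List.mem_pyRange_one).mpr (by omega), by decide⟩
    · exact ⟨40, (PySem.List.mem_pyRange_one).mpr (by omega), by decide⟩
    · exact ⟨41, (PySem.List.mem_pyRange_one).mpr (by omega), by decide⟩
    · exact ⟨42, (PySem.List.mem_pyRange_one).mpr (by omega), by decide⟩
    · exact ⟨43, (PySem.List.mem_pyRange_one).mpr (by omega), by decide⟩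
    · exact ⟨44, (PySem.List.mem_pyRange_one).mpr (by omega), by decide⟩
    · exact ⟨45, (PySem.List.mem_pyRange_one).mpr (by omega), by decide⟩
    · exact ⟨46, (PySem.List.mem_pyRange_one).mpr (by omega), by decide⟩
    · exact ⟨47, (PySem.List.mem_pyRange_one).mpr (by omega), by decide⟩
    · exact ⟨48, (PySem.List.mem_pyRange_one).mpr (by omega), by decide⟩
    · exact ⟨49, (PySem.List.mem_pyRange_one).mpr (by omega), by decide⟩
    · exact ⟨50, (PySem.List.mem_pyRange_one).mpr (by omega), by decide⟩
    · exact ⟨51, (PySem.List.mem_pyRange_one).mpr (by omega), by decide⟩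
    · exact ⟨52, (PySem.List.mem_pyRange_one).mpr (by omega), by decide⟩
    · exact ⟨53, (PySem.List.mem_pyRange_one).mpr (by omega), by decide⟩
    · exact ⟨54, (PySem.List.mem_pyRange_one).mpr (by omega), by decide⟩
    · exact ⟨55, (PySem.List.mem_pyRange_one).mpr (by omega), by decide⟩
    · exact ⟨56, (PySem.List.mem_pyRange_one).mpr (by omega), by decide⟩
    · exact ⟨57, (PySem.List.mem_pyRange_one).mpr (by omega), by decide⟩
    · exact ⟨58, (PySem.List.mem_pyRange_one).mpr (by omega), by decide⟩
    · exact ⟨59, (PySem.List.mem_pyRange_one).mpr (by omega), by decide⟩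
    · exact ⟨60, (PySem.List.mem_pyRange_one).mpr (by omega), by decide⟩
    · exact ⟨61, (PySem.List.mem_pyRange_one).mpr (by omega), by decide⟩
    · exact ⟨62, (PySem.List.mem_pyRange_one).mpr (by omega), by decide⟩
    · exact ⟨63, (PySem.List.mem_pyRange_one).mpr (by omega), by decide⟩
    · exact ⟨64, (PySem.List.mem_pyRange_one).mpr (by omega), by decide⟩
    · exact ⟨65, (PySem.List.mem_pyRange_one).mpr (by omega), by decide⟩
    · exact ⟨66, (PySem.List.mem_pyRange_one).mpr (by omega), by decide⟩
    · exact ⟨67, (PySem.List.mem_pyRange_one).mpr (by omega), by decide⟩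
    · exact ⟨68, (PySem.List.mem_pyRange_one).mpr (by omega), by decide⟩
    · exact ⟨69, (PySem.List.mem_pyRange_one).mpr (by omega), by decide⟩
    · exact ⟨70, (PySem.List.mem_pyRange_one).mpr (by omega), by decide⟩
    · exact ⟨71, (PySem.List.mem_pyRange_one).mpr (by omega), by decide⟩
    · exact ⟨72, (PySem.List.mem_pyRange_one).mpr (by omega), by decide⟩
    · exact ⟨73, (PySem.List.mem_pyRange_one).mpr (by omega), by decide⟩
    · exact ⟨74, (PySem.List.mem_pyRange_one).mpr (by omega), by decide⟩
    · exact ⟨75, (PySem.List.mem_pyRange_one).mpr (by omega), by decide⟩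
    · exact ⟨76, (PySem.List.mem_pyRange_one).mpr (by omega), by decide⟩
    · exact ⟨77, (PySem.List.mem_pyRange_one).mpr (by omega), by decide⟩
    · exact ⟨78, (PySem.List.mem_pyRange_one).mpr (by omega), by decide⟩
    · exact ⟨79, (PySem.List.mem_pyRange_one).mpr (by omega), by decide⟩
    · exact ⟨80, (PySem.List.mem_pyRange_one).mpr (by omega), by decide⟩
    · exact ⟨81, (PySem.List.mem_pyRange_one).mpr (by omega), by decide⟩
    · exact ⟨82, (PySem.List.mem_pyRange_one).mpr (by omega), by decide⟩
    · exact ⟨83, (PySem.List.mem_pyRange_one).mpr (by omega), by decide⟩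
    · exact ⟨84, (PySem.List.mem_pyRange_one).mpr (by omega), by decide⟩
    · exact ⟨85, (PySem.List.mem_pyRange_one).mpr (by omega), by decide⟩
    · exact ⟨86, (PySem.List.mem_pyRange_one).mpr (by omega), by decide⟩
    · exact ⟨87, (PySem.List.mem_pyRange_one).mpr (by omega), by decide⟩
    · exact ⟨88, (PySem.List.mem_pyRange_one).mpr (by omega), by decide⟩
    · exact ⟨89, (PySem.List.mem_pyRange_one).mpr (by omega), by decide⟩
    · exact ⟨90, (PySem.List.mem_pyRange_one).mpr (by omega), by decide⟩
    · exact ⟨91, (PySem.List.mem_pyRange_one).mpr (by omega), by decide⟩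
    · exact ⟨92, (PySem.List.mem_pyRange_one).mpr (by omega), by decide⟩
    · exact ⟨93, (PySem.List.mem_pyRange_one).mpr (by omega), by decide⟩
    · exact ⟨94, (PySem.List.mem_pyRange_one).mpr (by omega), by decide⟩
    · exact ⟨95, (PySem.List.mem_pyRange_one).mpr (by omega), by decide⟩
    · exact ⟨96, (PySem.List.mem_pyRange_one).mpr (by omega), by decide⟩
    · exact ⟨97, (PySem.List.mem_pyRange_one).mpr (by omega), by decide⟩
    · exact ⟨98, (PySem.List.mem_pyRange_one).mpr (by omega), by decide⟩
    · exact ⟨99, (PySem.List.mem_pyRange_one).mpr (by omega), by decide⟩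
  · exact absurd h (by simp [bSufOk])

-- the two fallback halves agree on every name
theorem fallback_eq (name : String) :
    (if aMapping.contains name then aMapping.getD name name else name) = bTable name := by
  by_cases hk : name ∈ ["E", "E_bd", "E_in", "E_rel_in", "E_rel", "M", "M_bd", "M_in",
      "M_rel_in", "M_rel", "S", "S_bd", "S_in", "S_rel_in", "S_rel", "V", "V_bd", "V_in",
      "V_rel_in", "V_rel", "mean_x", "mean_y", "C_p", "iou", "score", "survival", "ratio",
      "deformation", "diff_mean", "diff_size"]
  · fin_cases hk <;> decide
  · simp only [List.mem_cons, List.not_mem_nil, or_false, not_or] at hk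
    have hA : aMapping.contains name = false := by
      rw [PySem.Dict.contains_eq_decide_mem_keys]
      have hkeys : aMapping.keys = ["E", "E_bd", "E_in", "E_rel_in", "E_rel", "M", "M_bd",
          "M_in", "M_rel_in", "M_rel", "S", "S_bd", "S_in", "S_rel_in", "S_rel", "V", "V_bd",
          "V_in", "V_rel_in", "V_rel", "mean_x", "mean_y", "C_p", "iou", "score", "survival",
          "ratio", "deformation", "diff_mean", "diff_size"] := by decide
      rw [hkeys]
      simp [hk]
    simp [bTable, hA, hk]

-- ===== VERDICT (by name: the statement is the Claim_ definition above) =====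
-- B's parse condition, read off name itself
theorem parse_of_eq (name : String) (i : Int) (hi : i ∈ PySem.List.pyRange 0 100 1)
    (heq : name.toList = "cprob".toList ++ PySem.Int.toChars i) :
    PySem.Chars.startswith name.toList "cprob".toList = true ∧
    bSufOk (PySem.List.slice name.toList (some 5) none) = true := by
  have hslice : PySem.List.slice name.toList (some 5) none = PySem.Int.toChars i := by
    have h5 := PySem.List.slice_from_natCast (xs := name.toList) (a := 5)
    rw [heq] at h5 ⊢
    simpa using h5
  constructor
  · rw [PySem.Chars.startswith_iff, heq]
    exact List.prefix_append _ _
  · rw [hslice]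
    exact sufOk_toChars i hi

theorem name_to_latex_spec : Claim_equal_name_to_latex := by
  intro name _
  unfold Spec_name_to_latex
  by_cases hs : PySem.Chars.startswith name.toList "cprob".toList = true
  · by_cases hb : bSufOk (PySem.List.slice name.toList (some 5) none) = true
    · -- B's parse fires: name is one of the 100 generated candidates
      obtain ⟨i, hi, hti⟩ := sufOk_complete _ hb
      have hpre : "cprob".toList <+: name.toList := (PySem.Chars.startswith_iff _ _).mp hs
      obtain ⟨t, ht⟩ := hpre
      have hdrop : PySem.List.slice name.toList (some 5) none = t := by
        have h5 := PySem.List.slice_from_natCast (xs := name.toList) (a := 5)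
        rw [← ht] at h5 ⊢
        simpa using h5
      have hname : name = String.ofList ("cprob".toList ++ PySem.Int.toChars i) := by
        rw [← String.ofList_toList (s := name), ← ht, hti, hdrop]
      rw [hname]
      exact ports_agree_on_candidates i hi
    · -- 'cprob' prefix but not a valid index: both take the fallback
      have hfind : (PySem.List.pyRange 0 100 1).find?
          (fun i => name.toList == "cprob".toList ++ PySem.Int.toChars i) = none := by
        rw [List.find?_eq_none]
        intro i hi hc
        exact hb ((parse_of_eq name i hi (by simpa using hc)).2)
      unfold name_to_latex name_to_latex_alt
      rw [hfind]
      simp only [hs, if_true, hb, if_false, Bool.false_eq_true]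
      exact fallback_eq name
  · -- no 'cprob' prefix: the scan cannot hit, both take the fallback
    have hfind : (PySem.List.pyRange 0 100 1).find?
        (fun i => name.toList == "cprob".toList ++ PySem.Int.toChars i) = none := by
      rw [List.find?_eq_none]
      intro i hi hc
      exact hs ((parse_of_eq name i hi (by simpa using hc)).1)
    unfold name_to_latex name_to_latex_alt
    rw [hfind]
    simp only [hs, Bool.false_eq_true, if_false]
    exact fallback_eq name
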